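-- pv_equiv track=rewrite | github.com/takecap/70puzzles | src/q41.py | search_pairs
-- ===== SOURCE A (Python) =====
-- pairs = [(str(num), str(int(format(num, '08b')[::-1], 2))) for num in range(256)]
--
-- def digits(pair, num):
--   if len(pair[0] + pair[1]) != num:
--     return False
--   flags = [False] * 10
--   for d in pair[0] + pair[1]:
--     flags[int(d)] = True
--   return sum(flags) == num
--
-- def search_pairs(n0=5):
--   n1 = 10 - n0
--   results = []
--   candidates0 = [pair for pair in pairs if digits(pair, n0)] # n0 個の数字を使う pair のリスト
--   candidates1 = [pair for pair in pairs if digits(pair, n1)] # 10-n0 個の数字を使う pair のリスト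
--   for p0 in candidates0:
--     for p1 in candidates1:
--       flags = [False] * 10
--       for d in p0[0] + p0[1] + p1[0] + p1[1]:
--         flags[int(d)] = True
--       if sum(flags) == 10: # p0, p1 で１０個の数字を使う組合せを探す
--         results.append((p0, p1))
--   return results
-- ===== SOURCE B (Python) =====
-- pairs = [(str(num), str(int(format(num, '08b')[::-1], 2))) for num in range(256)]
--
-- def search_pairs(n0=5):
--   n1 = 10 - n0
--
--   def present(pair):
--     # the distinct digits occurring in the pair, as a sorted list 0..9
--     s = pair[0] + pair[1]
--     return [i for i in range(10) if str(i) in s]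
--
--   def mask(pair):
--     return sum(2 ** i for i in present(pair))
--
--   def good(pair, num):
--     return len(pair[0] + pair[1]) == num and len(present(pair)) == num
--
--   candidates1 = [pair for pair in pairs if good(pair, n1)]
--   index = {}
--   for p1 in candidates1:
--     k = mask(p1)
--     index[k] = index.get(k, []) + [p1]
--
--   results = []
--   candidates0 = [pair for pair in pairs if good(pair, n0)]
--   for p0 in candidates0:
--     for p1 in index.get(1023 - mask(p0), []):
--       results.append((p0, p1))
--   return results
-- ===== Notes on version B (the rewrite author's own statement) =====
-- stated objective: alternative
-- what changed: Replaces A's nested candidates0 x candidates1 scan (rebuilding a flag array per pair of pairs) with a dict that groups candidates1 by their digit-bitmask, so each candidates0 pair does a single lookup of its complement mask; digit bookkeeping uses arithmetic bitmasks instead of boolean flag lists.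
import Mathlib
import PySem

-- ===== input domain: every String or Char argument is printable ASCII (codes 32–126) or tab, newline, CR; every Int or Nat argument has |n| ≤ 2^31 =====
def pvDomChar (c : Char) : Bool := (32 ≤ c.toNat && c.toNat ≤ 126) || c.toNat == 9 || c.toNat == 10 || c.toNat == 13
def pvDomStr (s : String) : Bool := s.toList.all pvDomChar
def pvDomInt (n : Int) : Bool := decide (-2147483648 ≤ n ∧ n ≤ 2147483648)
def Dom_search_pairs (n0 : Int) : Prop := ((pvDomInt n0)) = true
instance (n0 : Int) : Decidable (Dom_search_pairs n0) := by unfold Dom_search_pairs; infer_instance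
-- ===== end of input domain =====

-- B replaces A's nested candidate0 × candidate1 scan by a dict keyed on the digit-bitmask of
-- each candidate1 pair, looked up at the complement mask of each candidate0 pair (objective: alternative).

-- ===== PORT A =====

-- int(d) for a single decimal-digit character (exact: every char fed to it comes from str(num), all digits)
def pvCharInt (d : Char) : Int := (d.toNat : Int) - 48

-- format(num, '08b') for 0 ≤ num: the binary digits of num, zero-padded on the left to width 8 (exact there)
def pvFormat08b (num : Int) : List Char := PySem.Chars.zfill (Nat.toDigits 2 num.toNat) 8

-- int(s, 2) for a string of binary digits (exact there)
def pvParseBin (cs : List Char) : Int := cs.foldl (fun acc c => acc * 2 + pvCharInt c) 0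

-- pairs = [(str(num), str(int(format(num, '08b')[::-1], 2))) for num in range(256)]
def pairsList : List (String × String) :=
  (PySem.List.pyRange 0 256 1).map (fun num =>
    (PySem.Int.toStr num, PySem.Int.toStr (pvParseBin (pvFormat08b num).reverse)))

-- flags[int(d)] = True for each d (pySetD exact: int(d) is always 0..9 on the data reached)
def pvFlagsOf (s : List Char) : List Bool :=
  s.foldl (fun flags d => PySem.List.pySetD flags (pvCharInt d) true) (List.replicate 10 false)

def digitsA (pair : String × String) (num : Int) : Bool :=
  if ((pair.1.toList ++ pair.2.toList).length : Int) ≠ num then false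
  else ((pvFlagsOf (pair.1.toList ++ pair.2.toList)).count true : Int) == num

def search_pairs (n0 : Int) : List ((String × String) × (String × String)) :=
  let n1 := 10 - n0
  let candidates0 := pairsList.filter (fun pair => digitsA pair n0)
  let candidates1 := pairsList.filter (fun pair => digitsA pair n1)
  candidates0.foldl (fun results p0 =>
    candidates1.foldl (fun results p1 =>
      let flags := pvFlagsOf (p0.1.toList ++ p0.2.toList ++ p1.1.toList ++ p1.2.toList)
      if ((flags.count true : Int) == 10) then results ++ [(p0, p1)] else results)
      results) []

-- ===== PORT B =====

-- [i for i in range(10) if str(i) in pair[0] + pair[1]]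
def pvPresent (pair : String × String) : List Int :=
  (PySem.List.pyRange 0 10 1).filter
    (fun i => PySem.Chars.isIn (PySem.Int.toStr i).toList (pair.1.toList ++ pair.2.toList))

-- sum(2 ** i for i in present(pair))  (2 ** i ported as 2 ^ i.toNat: exact, i is 0..9)
def pvMask (pair : String × String) : Int := ((pvPresent pair).map (fun i => (2 : Int) ^ i.toNat)).sum

def pvGood (pair : String × String) (num : Int) : Bool :=
  (((pair.1.toList ++ pair.2.toList).length : Int) == num) && (((pvPresent pair).length : Int) == num)

def search_pairs_alt (n0 : Int) : List ((String × String) × (String × String)) :=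
  let n1 := 10 - n0
  let candidates1 := pairsList.filter (fun pair => pvGood pair n1)
  let index := candidates1.foldl (fun d p1 =>
    let k := pvMask p1
    d.insert k (d.getD k [] ++ [p1])) (PySem.Dict.empty : PySem.Dict Int (List (String × String)))
  let candidates0 := pairsList.filter (fun pair => pvGood pair n0)
  candidates0.foldl (fun results p0 =>
    (index.getD (1023 - pvMask p0) []).foldl (fun results p1 => results ++ [(p0, p1)]) results) []

-- ===== PRECONDITION & SPEC =====
def Spec_search_pairs (n0 : Int) (out : List ((String × String) × (String × String))) : Prop := out = search_pairs_alt n0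
instance (n0 : Int) (out : List ((String × String) × (String × String))) : Decidable (Spec_search_pairs n0 out) := by unfold Spec_search_pairs; infer_instance

-- ===== CLAIM (what is proved, stated in full; the proofs are below) =====
def Claim_equal_search_pairs : Prop := ∀ (n0 : Int), Dom_search_pairs n0 → Spec_search_pairs n0 (search_pairs n0)

-- ===== LEMMAS AND PROOFS =====

-- the module-level pairs list, evaluated once to a literal so the later kernel computations are cheap
def pairsLit : List (String × String) := [("0", "0"), ("1", "128"), ("2", "64"), ("3", "192"), ("4", "32"), ("5", "160"), ("6", "96"), ("7", "224"), ("8", "16"), ("9", "144"), ("10", "80"), ("11", "208"), ("12", "48"), ("13", "176"), ("14", "112"), ("15", "240"), ("16", "8"), ("17", "136"), ("18", "72"), ("19", "200"), ("20", "40"), ("21", "168"), ("22", "104"), ("23", "232"), ("24", "24"), ("25", "152"), ("26", "88"), ("27", "216"), ("28", "56"), ("29", "184"), ("30", "120"), ("31", "248"), ("32", "4"), ("33", "132"), ("34", "68"), ("35", "196"), ("36", "36"), ("37", "164"), ("38", "100"), ("39", "228"), ("40", "20"), ("41", "148"), ("42", "84"), ("43", "212"), ("44", "52"), ("45", "180"),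 ("46", "116"), ("47", "244"), ("48", "12"), ("49", "140"), ("50", "76"), ("51", "204"), ("52", "44"), ("53", "172"), ("54", "108"), ("55", "236"), ("56", "28"), ("57", "156"), ("58", "92"), ("59", "220"), ("60", "60"), ("61", "188"), ("62", "124"), ("63", "252"), ("64", "2"), ("65", "130"), ("66", "66"), ("67", "194"), ("68", "34"), ("69", "162"), ("70", "98"), ("71", "226"), ("72", "18"), ("73", "146"), ("74", "82"), ("75", "210"), ("76", "50"), ("77", "178"), ("78", "114"), ("79", "242"), ("80", "10"), ("81", "138"), ("82", "74"), ("83", "202"), ("84", "42"), ("85", "170"), ("86", "106"), ("87", "234"), ("88", "26"), ("89", "154"), ("90", "90"), ("91", "218"), ("92", "58"), ("93", "186"), ("94", "122"), ("95", "250"), ("96", "6"), ("97", "134"), ("98", "70"), ("99", "198"), ("100", "38"), ("101", "166"), ("102", "102"), ("103", "230"), ("104", "22"), ("105", "150"), ("106", "86"), ("107", "214"), ("108", "54"), ("109", "182"), ("110", "118"), ("111", "246"), ("112", "14"), ("113", "142"), ("114", "78"), ("115", "206"), ("116", "46"), ("117", "174"), ("118", "110"), ("119", "238"), ("120", "30"),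 ("121", "158"), ("122", "94"), ("123", "222"), ("124", "62"), ("125", "190"), ("126", "126"), ("127", "254"), ("128", "1"), ("129", "129"), ("130", "65"), ("131", "193"), ("132", "33"), ("133", "161"), ("134", "97"), ("135", "225"), ("136", "17"), ("137", "145"), ("138", "81"), ("139", "209"), ("140", "49"), ("141", "177"), ("142", "113"), ("143", "241"), ("144", "9"), ("145", "137"), ("146", "73"), ("147", "201"), ("148", "41"), ("149", "169"), ("150", "105"), ("151", "233"), ("152", "25"), ("153", "153"), ("154", "89"), ("155", "217"), ("156", "57"), ("157", "185"), ("158", "121"), ("159", "249"), ("160", "5"), ("161", "133"), ("162", "69"), ("163", "197"), ("164", "37"), ("165", "165"), ("166", "101"), ("167", "229"), ("168", "21"), ("169", "149"), ("170", "85"), ("171", "213"), ("172", "53"), ("173", "181"), ("174", "117"), ("175", "245"), ("176", "13"), ("177", "141"), ("178", "77"), ("179", "205"), ("180", "45"), ("181", "173"), ("182", "109"), ("183", "237"), ("184", "29"), ("185", "157"), ("186", "93"), ("187", "221"), ("188", "61"), ("189", "189"), ("190", "125"), ("191", "253"), ("192", "3"), ("193", "131"), ("194", "67"), ("195", "195"),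 ("196", "35"), ("197", "163"), ("198", "99"), ("199", "227"), ("200", "19"), ("201", "147"), ("202", "83"), ("203", "211"), ("204", "51"), ("205", "179"), ("206", "115"), ("207", "243"), ("208", "11"), ("209", "139"), ("210", "75"), ("211", "203"), ("212", "43"), ("213", "171"), ("214", "107"), ("215", "235"), ("216", "27"), ("217", "155"), ("218", "91"), ("219", "219"), ("220", "59"), ("221", "187"), ("222", "123"), ("223", "251"), ("224", "7"), ("225", "135"), ("226", "71"), ("227", "199"), ("228", "39"), ("229", "167"), ("230", "103"), ("231", "231"), ("232", "23"), ("233", "151"), ("234", "87"), ("235", "215"), ("236", "55"), ("237", "183"), ("238", "119"), ("239", "247"), ("240", "15"), ("241", "143"), ("242", "79"), ("243", "207"), ("244", "47"), ("245", "175"), ("246", "111"), ("247", "239"), ("248", "31"), ("249", "159"), ("250", "95"), ("251", "223"), ("252", "63"), ("253", "191"), ("254", "127"), ("255", "255")]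

set_option maxRecDepth 1000000 in
theorem pairsList_eq : pairsList = pairsLit := by decide

-- every pair in the module-level list uses between 2 and 6 characters in total
set_option maxRecDepth 1000000 in
theorem pairsList_len_le : ∀ p ∈ pairsList, (p.1.toList ++ p.2.toList).length ≤ 6 := by
  rw [pairsList_eq]; decide

theorem digitsA_false_of_large (p : String × String) (hp : p ∈ pairsList) (num : Int)
    (h : 7 ≤ num) : digitsA p num = false := by
  have := pairsList_len_le p hp
  unfold digitsA
  rw [if_pos (by omega)]

theorem pvGood_false_of_large (p : String × String) (hp : p ∈ pairsList) (num : Int)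
    (h : 7 ≤ num) : pvGood p num = false := by
  have := pairsList_len_le p hp
  unfold pvGood
  have hb : (((p.1.toList ++ p.2.toList).length : Int) == num) = false := by
    simp only [beq_eq_false_iff_ne, ne_eq]; omega
  rw [hb, Bool.false_and]

theorem search_pairs_empty_of_large (n0 : Int) (h : 7 ≤ n0) : search_pairs n0 = [] := by
  unfold search_pairs
  have hc0 : pairsList.filter (fun pair => digitsA pair n0) = [] :=
    List.filter_eq_nil_iff.mpr (fun p hp => by simp [digitsA_false_of_large p hp n0 h])
  simp only [hc0, List.foldl_nil]

theorem search_pairs_alt_empty_of_large (n0 : Int) (h : 7 ≤ n0) : search_pairs_alt n0 = [] := by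
  unfold search_pairs_alt
  have hc0 : pairsList.filter (fun pair => pvGood pair n0) = [] :=
    List.filter_eq_nil_iff.mpr (fun p hp => by simp [pvGood_false_of_large p hp n0 h])
  simp only [hc0, List.foldl_nil]

theorem search_pairs_empty_of_small (n0 : Int) (h : n0 ≤ 3) : search_pairs n0 = [] := by
  unfold search_pairs
  have hc1 : pairsList.filter (fun pair => digitsA pair (10 - n0)) = [] :=
    List.filter_eq_nil_iff.mpr (fun p hp => by
      simp [digitsA_false_of_large p hp (10 - n0) (by omega)])
  simp only [hc1, List.foldl_nil]
  exact PySem.List.foldl_ignore _ _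

theorem search_pairs_alt_empty_of_small (n0 : Int) (h : n0 ≤ 3) : search_pairs_alt n0 = [] := by
  unfold search_pairs_alt
  have hc1 : pairsList.filter (fun pair => pvGood pair (10 - n0)) = [] :=
    List.filter_eq_nil_iff.mpr (fun p hp => by
      simp [pvGood_false_of_large p hp (10 - n0) (by omega)])
  simp only [hc1, List.foldl_nil]
  simp only [PySem.Dict.getD_empty, List.foldl_nil]
  exact PySem.List.foldl_ignore _ _

-- ===== VERDICT (by name: the statement is the Claim_ definition above) =====
set_option maxRecDepth 1000000 in
set_option maxHeartbeats 4000000 in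
theorem search_pairs_spec : Claim_equal_search_pairs := by
  unfold Claim_equal_search_pairs
  intro n0 _
  unfold Spec_search_pairs
  by_cases h1 : n0 <= 3
  . rw [search_pairs_empty_of_small n0 h1, search_pairs_alt_empty_of_small n0 h1]
  . by_cases h2 : 7 <= n0
    . rw [search_pairs_empty_of_large n0 h2, search_pairs_alt_empty_of_large n0 h2]
    . have h4 : 4 <= n0 := by omega
      have h6 : n0 <= 6 := by omega
      interval_cases n0 <;>
        (simp only [search_pairs, search_pairs_alt, pairsList_eq]; decide)
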